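-- pv_equiv track=rewrite | github.com/sstollenwerk/advent-code-2015 | app/day19.py | replacements
-- ===== SOURCE A (Python) =====
-- Replaces = tuple[str, str]
--
-- def replacements(s:str, r:Replaces) -> list[str]:
--     a,b = r
--     parts = s.split(a)
--     res = []
--     for i in range(1, len(parts)):
--         x,y = parts[:i], parts[i:]
--         res.append ( a.join(x) + b + a.join(y))
--     return res
-- ===== SOURCE B (Python) =====
-- def replacements(s, r):
--     a, b = r
--     parts = s.split(a)
--     sufs = [parts[-1]]
--     for p in reversed(parts[:-1]):
--         sufs.insert(0, p + a + sufs[0])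
--     res = []
--     pre = parts[0]
--     for p, suf in zip(parts[1:], sufs[1:]):
--         res.append(pre + b + suf)
--         pre = pre + a + p
--     return res
-- ===== Notes on version B (the rewrite author's own statement) =====
-- stated objective: alternative
-- what changed: Instead of re-slicing the parts list and re-joining both halves for every index, B splits once, precomputes the suffix joins in one backward pass and carries a running prefix forward, so no join is ever recomputed.
import Mathlib
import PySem

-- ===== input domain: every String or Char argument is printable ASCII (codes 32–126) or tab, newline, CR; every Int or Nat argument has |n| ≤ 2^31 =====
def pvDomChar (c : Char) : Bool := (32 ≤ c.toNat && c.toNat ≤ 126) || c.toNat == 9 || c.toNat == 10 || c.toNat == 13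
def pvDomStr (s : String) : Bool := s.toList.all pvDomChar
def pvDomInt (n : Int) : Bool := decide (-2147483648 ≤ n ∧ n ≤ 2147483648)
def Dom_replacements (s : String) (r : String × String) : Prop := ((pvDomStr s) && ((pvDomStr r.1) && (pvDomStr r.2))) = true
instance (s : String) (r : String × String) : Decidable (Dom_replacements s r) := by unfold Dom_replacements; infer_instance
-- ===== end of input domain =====

-- B replaces A's per-index slice-and-rejoin with one backward pass of precomputed
-- suffix joins plus a running prefix (objective: alternative decomposition, no re-joins).

-- ===== PORT A =====
-- A: parts = s.split(a); for i in 1..len(parts)-1: a.join(parts[:i]) + b + a.join(parts[i:])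
def replacements (s : String) (r : String × String) : List String :=
  let a := r.1.toList
  let b := r.2.toList
  match PySem.Chars.split? s.toList a with
  | none => []   -- s.split("") raises ValueError; excluded by Pre_replacements
  | some parts =>
    ((PySem.List.pyRange 1 (parts.length : Int) 1).foldl
      (fun res i =>
        let x := PySem.List.slice parts none (some i)
        let y := PySem.List.slice parts (some i) none
        res ++ [PySem.Chars.join a x ++ b ++ PySem.Chars.join a y]) []).map String.ofList

-- ===== PORT B =====
-- B: split once, build suffix joins back-to-front, then one forward pass with a running prefix.
def replacements_alt (s : String) (r : String × String) : List String :=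
  let a := r.1.toList
  let b := r.2.toList
  match PySem.Chars.split? s.toList a with
  | none => []   -- s.split("") raises ValueError; excluded by Pre_replacements
  | some parts =>
    let sufs := (PySem.List.slice parts none (some (-1))).reverse.foldl
        (fun acc p => (p ++ a ++ PySem.List.pyGetD acc 0 []) :: acc)
        [PySem.List.pyGetD parts (-1) []]
    let st := ((PySem.List.slice parts (some 1) none).zip (PySem.List.slice sufs (some 1) none)).foldl
        (fun (st : List (List Char) × List Char) pq =>
          (st.1 ++ [st.2 ++ b ++ pq.2], st.2 ++ a ++ pq.1))
        ([], PySem.List.pyGetD parts 0 [])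
    st.1.map String.ofList

-- ===== PRECONDITION & SPEC =====
-- Pre_ excludes only r.1 = "", where Python's s.split("") raises ValueError in A and in B alike.
def Pre_replacements (s : String) (r : String × String) : Prop := r.1 ≠ ""
instance (s : String) (r : String × String) : Decidable (Pre_replacements s r) := by unfold Pre_replacements; infer_instance
def pvWitness_replacements : String × (String × String) := ("abcab", ("ab", "x"))

def Spec_replacements (s : String) (r : String × String) (out : List String) : Prop := out = replacements_alt s r
instance (s : String) (r : String × String) (out : List String) : Decidable (Spec_replacements s r out) := by unfold Spec_replacements; infer_instance

-- ===== CLAIM (what is proved, stated in full; the proofs are below) =====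
def Claim_equal_replacements : Prop := ∀ (s : String) (r : String × String), Dom_replacements s r → Pre_replacements s r → Spec_replacements s r (replacements s r)

-- ===== LEMMAS AND PROOFS =====

-- the list of suffix joins: joinSufs a (p :: t) = [join a (p::t), join a t, …, join a [last]]
def joinSufs (a : List Char) : List (List Char) → List (List Char)
  | [] => []
  | p :: t => PySem.Chars.join a (p :: t) :: joinSufs a t

-- the common middle form: element i is (prefix so far) ++ b ++ join of the remaining parts
def lspec (a b pre : List Char) : List (List Char) → List (List Char)
  | [] => []
  | p :: t => (pre ++ b ++ PySem.Chars.join a (p :: t)) :: lspec a b (pre ++ a ++ p) t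

theorem join_merge (a x y : List Char) (t : List (List Char)) :
    PySem.Chars.join a (x :: y :: t) = PySem.Chars.join a ((x ++ a ++ y) :: t) := by
  cases t with
  | nil => simp [PySem.Chars.join_cons_cons, PySem.Chars.join_singleton]
  | cons q t' =>
      rw [PySem.Chars.join_cons_cons, PySem.Chars.join_cons_cons a y,
        PySem.Chars.join_cons_cons a (x ++ a ++ y)]
      simp [List.append_assoc]

theorem a_map (a b : List Char) (rest : List (List Char)) (pre : List Char) :
    (List.range rest.length).map
      (fun k => PySem.Chars.join a (pre :: rest.take k) ++ b ++ PySem.Chars.join a (rest.drop k))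
      = lspec a b pre rest := by
  induction rest generalizing pre with
  | nil => simp [lspec]
  | cons p t ih =>
      rw [List.length_cons, List.range_succ_eq_map, List.map_cons, List.map_map]
      simp only [List.take_zero, List.drop_zero, PySem.Chars.join_singleton]
      rw [lspec]
      congr 1
      rw [← ih (pre ++ a ++ p)]
      apply List.map_congr_left
      intro k _
      simp only [Function.comp, Nat.succ_eq_add_one, List.take_succ_cons, List.drop_succ_cons]
      rw [join_merge]

theorem b_sufs (a : List Char) (parts : List (List Char)) (h : parts ≠ []) :
    parts.dropLast.foldr
      (fun p acc => (p ++ a ++ PySem.List.pyGetD acc 0 []) :: acc)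
      [parts.getLast h] = joinSufs a parts := by
  induction parts with
  | nil => exact absurd rfl h
  | cons p t ih =>
      cases t with
      | nil => simp [joinSufs, PySem.Chars.join_singleton]
      | cons q t' =>
          have ht : (q :: t') ≠ [] := by simp
          rw [List.getLast_cons ht]
          have : (p :: q :: t').dropLast = p :: (q :: t').dropLast := by
            simp [List.dropLast]
          rw [this, List.foldr_cons, ih ht]
          simp [joinSufs, PySem.List.pyGetD_zero_cons, PySem.Chars.join_cons_cons,
            List.append_assoc]

theorem b_loop (a b : List Char) (rest : List (List Char)) (pre : List Char) (acc : List (List Char)) :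
    ((rest.zip (joinSufs a rest)).foldl
      (fun (st : List (List Char) × List Char) pq =>
        (st.1 ++ [st.2 ++ b ++ pq.2], st.2 ++ a ++ pq.1)) (acc, pre)).1
      = acc ++ lspec a b pre rest := by
  induction rest generalizing pre acc with
  | nil => simp [joinSufs, lspec]
  | cons p t ih =>
      rw [joinSufs, List.zip_cons_cons, List.foldl_cons, lspec]
      rw [ih (pre ++ a ++ p) (acc ++ [pre ++ b ++ PySem.Chars.join a (p :: t)])]
      simp

-- ===== VERDICT (by name: the statement is the Claim_ definition above) =====
theorem replacements_spec : Claim_equal_replacements := by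
  intro s r _ hpre
  unfold Spec_replacements replacements replacements_alt
  have ha : r.1.toList.isEmpty = false := by
    cases hr : r.1.toList with
    | nil => exact absurd (String.toList_eq_nil_iff.mp hr) hpre
    | cons c cs => simp
  simp only [PySem.Chars.split?, ha, Bool.false_eq_true, if_false]
  set a := r.1.toList
  set b := r.2.toList
  set parts := PySem.Chars.splitOn s.toList a with hparts
  clear_value parts
  cases parts with
  | nil =>
      simp [PySem.List.pyRange_one_eq_nil, PySem.List.slice, PySem.List.pyGetD]
  | cons p t =>
      refine congrArg (List.map String.ofList) ?_
      -- A side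
      rw [PySem.List.foldl_append_singleton_eq_map
        (fun i => PySem.Chars.join a (PySem.List.slice (p :: t) none (some i)) ++ b
          ++ PySem.Chars.join a (PySem.List.slice (p :: t) (some i) none)) _ []]
      rw [List.nil_append, PySem.List.pyRange_one, List.map_map]
      have hlen : (((p :: t).length : Int) - 1).toNat = t.length := by
        simp
      rw [hlen]
      have hA : (List.range t.length).map
          ((fun i => PySem.Chars.join a (PySem.List.slice (p :: t) none (some i)) ++ b
            ++ PySem.Chars.join a (PySem.List.slice (p :: t) (some i) none)) ∘ (fun k : Nat => (1 : Int) + k))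
          = lspec a b p t := by
        rw [← a_map a b t p]
        apply List.map_congr_left
        intro k _
        have hc : (1 : Int) + (k : Nat) = ((k + 1 : Nat) : Int) := by push_cast; ring
        simp only [Function.comp, hc, PySem.List.slice_to_natCast, PySem.List.slice_from_natCast,
          List.take_succ_cons, List.drop_succ_cons]
      rw [hA]
      -- B side
      rw [PySem.List.slice_to_neg_one, List.foldl_reverse]
      have hne : (p :: t) ≠ [] := by simp
      rw [PySem.List.pyGetD_neg_one _ _ hne]
      rw [b_sufs a (p :: t) hne]
      rw [PySem.List.slice_from_one, PySem.List.slice_from_one, List.tail_cons,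
        PySem.List.pyGetD_zero_cons]
      have : joinSufs a (p :: t) = PySem.Chars.join a (p :: t) :: joinSufs a t := rfl
      rw [this, List.tail_cons, b_loop a b t p []]
      rw [List.nil_append]
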